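-- pv_equiv track=rewrite | github.com/ozkag/Python-Fundamentals | pairs_of_index_to_target.py | pairs_sum_to_target
-- ===== SOURCE A (Python) =====
-- def pairs_sum_to_target(list1, list2, target):
--     my_list = []
--
--     for i in range(len(list1)):
--         for j in range(len(list2)):
--             lst = []
--             if list1[i] + list2[j] == target:
--                 lst.append(i)
--                 lst.append(j)
--                 my_list.append(lst)
--
--     return my_list
-- ===== SOURCE B (Python) =====
-- def pairs_sum_to_target(list1, list2, target):
--     idx = {}
--     for j, v in enumerate(list2):
--         idx.setdefault(v, []).append(j)
--     out = []
--     for i, v in enumerate(list1):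
--         for j in idx.get(target - v, []):
--             out.append([i, j])
--     return out
-- ===== Notes on version B (the rewrite author's own statement) =====
-- stated objective: faster
-- what changed: replaces the nested scan of list2 for every i by a hash index from value to its (ascending) list of indices in list2, built once, so each i does one dictionary lookup
import Mathlib
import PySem

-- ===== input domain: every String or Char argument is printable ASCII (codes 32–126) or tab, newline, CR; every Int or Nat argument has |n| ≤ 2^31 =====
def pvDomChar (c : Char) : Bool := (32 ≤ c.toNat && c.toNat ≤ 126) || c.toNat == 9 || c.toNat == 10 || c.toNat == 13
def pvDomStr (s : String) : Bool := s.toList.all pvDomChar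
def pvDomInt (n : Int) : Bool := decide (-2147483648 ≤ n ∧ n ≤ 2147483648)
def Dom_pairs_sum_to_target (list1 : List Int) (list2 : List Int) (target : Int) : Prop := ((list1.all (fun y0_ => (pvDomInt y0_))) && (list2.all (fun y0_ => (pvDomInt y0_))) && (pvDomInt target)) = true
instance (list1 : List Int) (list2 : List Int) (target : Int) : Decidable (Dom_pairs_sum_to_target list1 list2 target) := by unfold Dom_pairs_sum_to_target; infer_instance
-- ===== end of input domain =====

-- B replaces A's nested scan of list2 for every i by a dictionary value -> ascending index list over list2, built once (objective: faster).

-- ===== PORT A =====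
-- nested loops over range(len(list1)) × range(len(list2)); the indices are always in range, so pyGetD with default 0 is exact here
def pairs_sum_to_target (list1 : List Int) (list2 : List Int) (target : Int) : List (List Int) :=
  (PySem.List.pyRange 0 (list1.length : Int) 1).foldl (fun my_list i =>
    (PySem.List.pyRange 0 (list2.length : Int) 1).foldl (fun my_list j =>
      if PySem.List.pyGetD list1 i 0 + PySem.List.pyGetD list2 j 0 = target
      then my_list ++ [[i, j]] else my_list) my_list) []

-- ===== PORT B =====
def pairs_sum_to_target_alt (list1 : List Int) (list2 : List Int) (target : Int) : List (List Int) :=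
  let idx : PySem.Dict Int (List Int) :=
    (PySem.List.enumerate list2 0).foldl
      (fun d p => d.modify p.2 [] (fun l => l ++ [p.1])) PySem.Dict.empty
  (PySem.List.enumerate list1 0).foldl
    (fun out p => (idx.getD (target - p.2) []).foldl (fun out j => out ++ [[p.1, j]]) out) []

-- ===== PRECONDITION & SPEC =====
def Spec_pairs_sum_to_target (list1 : List Int) (list2 : List Int) (target : Int) (out : List (List Int)) : Prop := out = pairs_sum_to_target_alt list1 list2 target
instance (list1 : List Int) (list2 : List Int) (target : Int) (out : List (List Int)) : Decidable (Spec_pairs_sum_to_target list1 list2 target out) := by unfold Spec_pairs_sum_to_target; infer_instance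

-- ===== CLAIM (what is proved, stated in full; the proofs are below) =====
def Claim_equal_pairs_sum_to_target : Prop := ∀ (list1 : List Int) (list2 : List Int) (target : Int), Dom_pairs_sum_to_target list1 list2 target → Spec_pairs_sum_to_target list1 list2 target (pairs_sum_to_target list1 list2 target)

-- ===== LEMMAS AND PROOFS =====

-- B's index looked up at c is exactly the ascending list of positions j of list2 with list2[j] = c
lemma idx_getD (list2 : List Int) (c : Int) :
    (((PySem.List.pyRange 0 (list2.length : Int) 1).foldl
        (fun d j => d.modify (PySem.List.pyGetD list2 j 0) [] (fun l => l ++ [j]))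
        PySem.Dict.empty).getD c [])
      = (PySem.List.pyRange 0 (list2.length : Int) 1).filter
          (fun j => PySem.List.pyGetD list2 j 0 == c) := by
  have h := List.foldl_map
    (f := fun (j : Int) => (PySem.List.pyGetD list2 j 0, j))
    (g := fun (d : PySem.Dict Int (List Int)) (p : Int × Int) =>
      d.modify p.1 [] (fun l => l ++ [p.2]))
    (l := PySem.List.pyRange 0 (list2.length : Int) 1)
    (init := PySem.Dict.empty)
  rw [show (fun (d : PySem.Dict Int (List Int)) (j : Int) =>
        d.modify (PySem.List.pyGetD list2 j 0) [] (fun l => l ++ [j]))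
      = (fun (d : PySem.Dict Int (List Int)) (j : Int) =>
        (fun (d : PySem.Dict Int (List Int)) (p : Int × Int) =>
          d.modify p.1 [] (fun l => l ++ [p.2])) d
          ((fun (j : Int) => (PySem.List.pyGetD list2 j 0, j)) j)) from rfl,
    ← h]
  rw [PySem.Dict.getD_foldl_modify_append, PySem.Dict.getD_empty, List.filter_map, List.map_map]
  simp [Function.comp_def]

theorem pairs_sum_to_target_eq (list1 : List Int) (list2 : List Int) (target : Int) :
    pairs_sum_to_target list1 list2 target = pairs_sum_to_target_alt list1 list2 target := by
  simp only [pairs_sum_to_target, pairs_sum_to_target_alt,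
    PySem.List.foldl_append_ite, PySem.List.foldl_append_singleton_eq_map,
    PySem.List.enumerate_eq_map_pyRange (d := (0 : Int)), List.foldl_map,
    PySem.List.foldl_append_eq_flatMap, List.nil_append, PySem.List.len, idx_getD]
  refine List.flatMap_congr ?_
  intro i _
  congr 1
  apply List.filter_congr
  intro j _
  show decide _ = decide _
  exact decide_eq_decide.mpr (by omega)

-- ===== VERDICT (by name: the statement is the Claim_ definition above) =====
theorem pairs_sum_to_target_spec : Claim_equal_pairs_sum_to_target := by
  intro list1 list2 target _
  exact pairs_sum_to_target_eq list1 list2 target
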